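-- pv_equiv track=rewrite | github.com/wz940216/From0to1-MLLM-StudyLog | week08_minillava_training_v1/code/dataset.py | extract_qa
-- ===== SOURCE A (Python) =====
-- def extract_qa(conversations):
--     """从 LLaVA 风格 conversations 中提取第一轮 human/gpt 问答。"""
--     question = None
--     answer = None
--     for message in conversations:
--         role = message.get("from")
--         value = message.get("value", "")
--         if role == "human" and question is None:
--             question = value
--         elif role == "gpt" and answer is None:
--             answer = value
--         if question is not None and answer is not None:
--             break
--     if question is None or answer is None:
--         raise ValueError("样本缺少 human/gpt 对话轮次，无法构造监督数据。")
--     return question, answer.strip()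
-- ===== SOURCE B (Python) =====
-- def extract_qa(conversations):
--     """从 LLaVA 风格 conversations 中提取第一轮 human/gpt 问答。"""
--     question = next((m.get("value", "") for m in conversations if m.get("from") == "human"), None)
--     answer = next((m.get("value", "") for m in conversations if m.get("from") == "gpt"), None)
--     if question is None or answer is None:
--         raise ValueError("样本缺少 human/gpt 对话轮次，无法构造监督数据。")
--     return question, answer.strip()
-- ===== Notes on version B (the rewrite author's own statement) =====
-- stated objective: idiomatic
-- what changed: Replaces the single stateful loop with break/elif bookkeeping by two independent next() searches, one for the first human message and one for the first gpt message.
import Mathlib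
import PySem

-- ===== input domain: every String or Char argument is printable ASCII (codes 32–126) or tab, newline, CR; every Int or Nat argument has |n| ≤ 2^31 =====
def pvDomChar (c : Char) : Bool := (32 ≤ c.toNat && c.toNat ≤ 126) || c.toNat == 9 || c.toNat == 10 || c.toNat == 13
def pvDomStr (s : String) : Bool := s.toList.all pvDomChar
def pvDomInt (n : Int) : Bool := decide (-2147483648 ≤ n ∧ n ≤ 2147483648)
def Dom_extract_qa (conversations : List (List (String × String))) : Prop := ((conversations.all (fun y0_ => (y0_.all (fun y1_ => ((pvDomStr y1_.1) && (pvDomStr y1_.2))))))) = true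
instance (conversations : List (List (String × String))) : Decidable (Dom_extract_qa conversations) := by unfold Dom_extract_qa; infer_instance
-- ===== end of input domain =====

-- B replaces A's single stateful loop (elif bookkeeping + break) by two independent
-- first-match searches; same values, different decomposition. Inputs on which A raises
-- ValueError (no human or no gpt message) are outside Pre_.

-- ===== PORT A =====
-- message.get("from") = first-match association-list lookup (dict convention)
-- A's loop: carries (question, answer) options, breaks as soon as both are set.
def extractQaLoop : List (List (String × String)) → Option String → Option String → Option String × Option String
  | [], q, a => (q, a)
  | m :: rest, q, a =>
    let role := m.lookup "from"
    let value := (m.lookup "value").getD ""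
    let q' := if role = some "human" ∧ q = none then some value else q
    let a' := if ¬ (role = some "human" ∧ q = none) ∧ role = some "gpt" ∧ a = none then some value else a
    if q'.isSome ∧ a'.isSome then (q', a') else extractQaLoop rest q' a'

def extract_qa (conversations : List (List (String × String))) : String × String :=
  match extractQaLoop conversations none none with
  | (some q, some a) => (q, PySem.Str.strip a)
  | _ => ("", "")  -- ValueError path; excluded by Pre_

-- ===== PORT B =====
-- first m.get("value","") among messages with m.get("from") == role (the next(...) search)
def firstVal (conversations : List (List (String × String))) (role : String) : Option String :=
  conversations.findSome? (fun m => if m.lookup "from" = some role then some ((m.lookup "value").getD "") else none)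

def extract_qa_alt (conversations : List (List (String × String))) : String × String :=
  match firstVal conversations "human" with
  | none => ("", "")  -- ValueError path; excluded by Pre_
  | some q =>
    match firstVal conversations "gpt" with
    | none => ("", "")  -- ValueError path; excluded by Pre_
    | some a => (q, PySem.Str.strip a)

-- ===== PRECONDITION & SPEC =====
-- Pre_ = exactly the inputs where the Python A returns (some human and some gpt message exist);
-- on the rest A raises ValueError.
def Pre_extract_qa (conversations : List (List (String × String))) : Prop :=
  (∃ m ∈ conversations, m.lookup "from" = some "human") ∧
  (∃ m ∈ conversations, m.lookup "from" = some "gpt")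
instance (conversations : List (List (String × String))) : Decidable (Pre_extract_qa conversations) := by unfold Pre_extract_qa; infer_instance

def pvWitness_extract_qa : (List (List (String × String))) :=
  [[("from", "human"), ("value", "hi?")], [("from", "gpt"), ("value", " hello ")]]

def Spec_extract_qa (conversations : List (List (String × String))) (out : String × String) : Prop := out = extract_qa_alt conversations
instance (conversations : List (List (String × String))) (out : String × String) : Decidable (Spec_extract_qa conversations out) := by unfold Spec_extract_qa; infer_instance

-- ===== CLAIM (what is proved, stated in full; the proofs are below) =====
def Claim_equal_extract_qa : Prop := ∀ (conversations : List (List (String × String))), Dom_extract_qa conversations → Pre_extract_qa conversations → Spec_extract_qa conversations (extract_qa conversations)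

-- ===== LEMMAS AND PROOFS =====

def optOr : Option String → Option String → Option String
  | some x, _ => some x
  | none, y => y

theorem extractQaLoop_eq (l : List (List (String × String))) :
    ∀ q a : Option String,
      extractQaLoop l q a = (optOr q (firstVal l "human"), optOr a (firstVal l "gpt")) := by
  induction l with
  | nil => intro q a; cases q <;> cases a <;> simp [extractQaLoop, firstVal, optOr]
  | cons m rest ih =>
    intro q a
    simp only [extractQaLoop, firstVal, List.findSome?]
    by_cases hh : m.lookup "from" = some "human"
    · have hg : ¬ m.lookup "from" = some "gpt" := by
        rw [hh]; decide
      cases q <;> cases a <;>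
        simp [hh, ih, firstVal, optOr]
    · by_cases hg : m.lookup "from" = some "gpt"
      · cases q <;> cases a <;>
          simp [hg, ih, firstVal, optOr]
      · cases q <;> cases a <;>
          simp [hh, hg, ih, firstVal, optOr]

theorem firstVal_isSome (l : List (List (String × String))) (role : String)
    (h : ∃ m ∈ l, m.lookup "from" = some role) : (firstVal l role).isSome := by
  obtain ⟨m, hm, hrole⟩ := h
  unfold firstVal
  rw [List.findSome?_isSome_iff]
  exact ⟨m, hm, by simp [hrole]⟩

-- ===== VERDICT (by name: the statement is the Claim_ definition above) =====
theorem extract_qa_spec : Claim_equal_extract_qa := by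
  intro conversations _ hpre
  unfold Spec_extract_qa extract_qa extract_qa_alt
  rw [extractQaLoop_eq]
  have hh := firstVal_isSome conversations "human" hpre.1
  have hg := firstVal_isSome conversations "gpt" hpre.2
  cases hH : firstVal conversations "human" with
  | none => rw [hH] at hh; simp at hh
  | some q =>
    cases hG : firstVal conversations "gpt" with
    | none => rw [hG] at hg; simp at hg
    | some a => simp [optOr]
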